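-- pv_equiv track=rewrite | github.com/l-yc/hack-mit-2025 | backend/backend.py | parse_caption_text_response
-- ===== SOURCE A (Python) =====
-- def parse_caption_text_response(captions_text):
--     """Fallback parser for non-JSON caption responses"""
--     captions = []
--     lines = captions_text.split('\n')
--
--     current_caption = {}
--     for line in lines:
--         line = line.strip()
--         if 'filename:' in line.lower() or 'photo' in line.lower():
--             if current_caption:
--                 captions.append(current_caption)
--             # Extract filename from line
--             if 'filename:' in line.lower():
--                 current_caption = {"filename": line.split(':', 1)[1].strip()}
--             else:
--                 current_caption = {"filename": f"photo_{len(captions) + 1}"}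
--         elif 'caption:' in line.lower():
--             current_caption["caption"] = line.split(':', 1)[1].strip()
--         elif 'style:' in line.lower():
--             current_caption["caption_style"] = line.split(':', 1)[1].strip()
--
--     if current_caption:
--         captions.append(current_caption)
--
--     return captions
-- ===== SOURCE B (Python) =====
-- def parse_caption_text_response(captions_text):
--     """Fallback parser for non-JSON caption responses (two-pass block decomposition)"""
--     lines = [ln.strip() for ln in captions_text.split('\n')]
--
--     def is_header(ln):
--         low = ln.lower()
--         return 'filename:' in low or 'photo' in low
--
--     # Pass 1: partition the stripped lines into blocks, one per header line,
--     # plus a leading block for any lines before the first header.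
--     blocks = []
--     current = []
--     for ln in lines:
--         if is_header(ln):
--             blocks.append(current)
--             current = [ln]
--         else:
--             current.append(ln)
--     blocks.append(current)
--
--     # Pass 2: build one dict per block; append only if non-empty so that
--     # photo numbering (len(result) + 1) counts the dicts actually kept.
--     result = []
--     for block in blocks:
--         d = {}
--         rest = block
--         if block and is_header(block[0]):
--             if 'filename:' in block[0].lower():
--                 d['filename'] = block[0].split(':', 1)[1].strip()
--             else:
--                 d['filename'] = f"photo_{len(result) + 1}"
--             rest = block[1:]
--         for ln in rest:
--             low = ln.lower()
--             if 'caption:' in low: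
--                 d['caption'] = ln.split(':', 1)[1].strip()
--             elif 'style:' in low:
--                 d['caption_style'] = ln.split(':', 1)[1].strip()
--         if d:
--             result.append(d)
--     return result
-- ===== Notes on version B (the rewrite author's own statement) =====
-- stated objective: alternative
-- what changed: Replaces A's single stateful loop (current dict flushed whenever a header line appears) by a two-pass decomposition: first partition the stripped lines into blocks at header lines, then build one dict per block and keep the non-empty ones.
import Mathlib
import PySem

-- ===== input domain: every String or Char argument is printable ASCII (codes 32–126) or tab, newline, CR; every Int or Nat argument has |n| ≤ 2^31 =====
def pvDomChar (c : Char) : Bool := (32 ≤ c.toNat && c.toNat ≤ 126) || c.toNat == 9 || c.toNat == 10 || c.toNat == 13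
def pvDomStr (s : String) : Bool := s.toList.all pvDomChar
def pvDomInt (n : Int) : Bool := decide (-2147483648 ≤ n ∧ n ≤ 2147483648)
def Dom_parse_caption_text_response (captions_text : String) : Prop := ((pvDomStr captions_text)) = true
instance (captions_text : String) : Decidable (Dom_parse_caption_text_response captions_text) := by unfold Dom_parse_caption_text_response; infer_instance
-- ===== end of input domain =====

-- B re-parses the text in two passes (partition into header blocks, then build one dict per
-- block) instead of A's single stateful loop; same value everywhere, a different decomposition.

-- shared line-level primitives (identical literal logic in both Pythons)
def pvIsHeader (l : String) : Bool :=
  PySem.Str.isIn "filename:" (PySem.Str.lower l) || PySem.Str.isIn "photo" (PySem.Str.lower l)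

-- line.split(':', 1)[1].strip(); only evaluated under guards that put a ':' in l,
-- so the [1] index always exists and the defaults are unreachable
def pvAfterColon (l : String) : String :=
  PySem.Str.strip (((PySem.Str.splitMax? l ":" 1).getD []).getD 1 "")

-- the caption:/style: elif chain applied to one (non-header) line
def pvFill (d : PySem.Dict String String) (l : String) : PySem.Dict String String :=
  if PySem.Str.isIn "caption:" (PySem.Str.lower l) then d.insert "caption" (pvAfterColon l)
  else if PySem.Str.isIn "style:" (PySem.Str.lower l) then d.insert "caption_style" (pvAfterColon l)
  else d

-- ===== PORT A =====
-- the body of A's loop on the already-stripped line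
def pvLineA (st : List (PySem.Dict String String) × PySem.Dict String String) (line : String) :
    List (PySem.Dict String String) × PySem.Dict String String :=
  if pvIsHeader line then
    let captions := if st.2.items = [] then st.1 else st.1 ++ [st.2]
    if PySem.Str.isIn "filename:" (PySem.Str.lower line) then
      (captions, (PySem.Dict.empty).insert "filename" (pvAfterColon line))
    else
      (captions, (PySem.Dict.empty).insert "filename"
        ("photo_" ++ PySem.Int.toStr ((captions.length : Int) + 1)))
  else
    (st.1, pvFill st.2 line)

def pvStepA (st : List (PySem.Dict String String) × PySem.Dict String String) (line0 : String) :
    List (PySem.Dict String String) × PySem.Dict String String :=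
  let line := PySem.Str.strip line0
  pvLineA st line

def parse_caption_text_response (captions_text : String) : List (List (String × String)) :=
  let st := ((PySem.Str.split? captions_text "\n").getD []).foldl pvStepA ([], PySem.Dict.empty)
  let captions := if st.2.items = [] then st.1 else st.1 ++ [st.2]
  captions.map (·.items)

-- ===== PORT B =====
-- pass 1 loop body: start a new block at each header line
def pvAddLine (st : List (List String) × List String) (l : String) :
    List (List String) × List String :=
  if pvIsHeader l then (st.1 ++ [st.2], [l]) else (st.1, st.2 ++ [l])

-- the 'filename' dict a header line opens (photo number = dicts kept so far + 1)
def pvHeaderDict (res : List (PySem.Dict String String)) (h : String) : PySem.Dict String String :=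
  if PySem.Str.isIn "filename:" (PySem.Str.lower h) then
    (PySem.Dict.empty).insert "filename" (pvAfterColon h)
  else
    (PySem.Dict.empty).insert "filename"
      ("photo_" ++ PySem.Int.toStr ((res.length : Int) + 1))

-- pass 2: the dict one block yields, given the dicts already kept
def pvBuildBlock (res : List (PySem.Dict String String)) (block : List String) :
    PySem.Dict String String :=
  match block with
  | [] => PySem.Dict.empty
  | h :: t =>
    if pvIsHeader h then t.foldl pvFill (pvHeaderDict res h)
    else (h :: t).foldl pvFill PySem.Dict.empty

def pvProcStep (res : List (PySem.Dict String String)) (block : List String) :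
    List (PySem.Dict String String) :=
  let d := pvBuildBlock res block
  if d.items = [] then res else res ++ [d]

def parse_caption_text_response_alt (captions_text : String) : List (List (String × String)) :=
  let lines := ((PySem.Str.split? captions_text "\n").getD []).map PySem.Str.strip
  let st := lines.foldl pvAddLine ([], [])
  let blocks := st.1 ++ [st.2]
  (blocks.foldl pvProcStep []).map (·.items)

-- ===== PRECONDITION & SPEC =====
def Spec_parse_caption_text_response (captions_text : String) (out : List (List (String × String))) : Prop := out = parse_caption_text_response_alt captions_text
instance (captions_text : String) (out : List (List (String × String))) : Decidable (Spec_parse_caption_text_response captions_text out) := by unfold Spec_parse_caption_text_response; infer_instance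

-- ===== CLAIM (what is proved, stated in full; the proofs are below) =====
def Claim_equal_parse_caption_text_response : Prop := ∀ (captions_text : String), Dom_parse_caption_text_response captions_text → Spec_parse_caption_text_response captions_text (parse_caption_text_response captions_text)

-- ===== LEMMAS AND PROOFS =====

-- the blocks B's pass 1 produces from remaining lines ls with pending block blk
def pvPart (blk : List String) : List String → List (List String)
  | [] => [blk]
  | l :: ls => if pvIsHeader l then blk :: pvPart [l] ls else pvPart (blk ++ [l]) ls

theorem pvAddLine_part (ls : List String) : ∀ (done : List (List String)) (blk : List String),
    (ls.foldl pvAddLine (done, blk)).1 ++ [(ls.foldl pvAddLine (done, blk)).2]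
      = done ++ pvPart blk ls := by
  induction ls with
  | nil => intro done blk; simp [pvPart]
  | cons l ls ih =>
    intro done blk
    by_cases h : pvIsHeader l
    · simp [pvAddLine, pvPart, h, ih]
    · simp [pvAddLine, pvPart, h, ih]

theorem pvFill_build (res : List (PySem.Dict String String)) (blk : List String) (l : String)
    (h : pvIsHeader l = false) :
    pvFill (pvBuildBlock res blk) l = pvBuildBlock res (blk ++ [l]) := by
  cases blk with
  | nil => simp [pvBuildBlock, h]
  | cons b t =>
    by_cases hb : pvIsHeader b
    · simp [pvBuildBlock, hb, List.foldl_append]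
    · simp [pvBuildBlock, hb, List.foldl_append]

-- A's single loop, run on the remaining lines from the state a partial block blk induces,
-- ends exactly where B's pass 2 ends on the blocks of those lines
theorem pvLoopA_blocks (ls : List String) :
    ∀ (res : List (PySem.Dict String String)) (blk : List String),
    (let st := ls.foldl pvLineA (res, pvBuildBlock res blk);
     if st.2.items = [] then st.1 else st.1 ++ [st.2])
      = (pvPart blk ls).foldl pvProcStep res := by
  induction ls with
  | nil => intro res blk; simp [pvPart, pvProcStep]
  | cons l ls ih =>
    intro res blk
    by_cases h : pvIsHeader l
    · have hcur : pvLineA (res, pvBuildBlock res blk) l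
          = (pvProcStep res blk, pvBuildBlock (pvProcStep res blk) [l]) := by
        simp only [pvLineA, pvBuildBlock, pvProcStep, pvHeaderDict, h, if_true, List.foldl_nil]
        split_ifs <;> rfl
      simp only [List.foldl_cons, hcur, pvPart, h, if_true]
      exact ih (pvProcStep res blk) [l]
    · have hcur : pvLineA (res, pvBuildBlock res blk) l
          = (res, pvBuildBlock res (blk ++ [l])) := by
        simp [pvLineA, h, pvFill_build res blk l (by simpa using h)]
      simp only [List.foldl_cons, hcur, pvPart, h]
      exact ih res (blk ++ [l])

-- ===== VERDICT (by name: the statement is the Claim_ definition above) =====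
theorem parse_caption_text_response_spec : Claim_equal_parse_caption_text_response := by
  intro s _
  unfold Spec_parse_caption_text_response
  unfold parse_caption_text_response parse_caption_text_response_alt
  simp only []
  have hA : ((PySem.Str.split? s "\n").getD []).foldl pvStepA ([], PySem.Dict.empty)
      = (((PySem.Str.split? s "\n").getD []).map PySem.Str.strip).foldl pvLineA
          ([], pvBuildBlock [] []) := by
    rw [List.foldl_map]; rfl
  rw [hA, pvAddLine_part]
  have key := pvLoopA_blocks (((PySem.Str.split? s "\n").getD []).map PySem.Str.strip) [] []
  simp only [] at key
  rw [key]
  rfl
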